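-- pv_equiv track=rewrite | github.com/ParsaFares/Computational-Neuroscience-Course | Final Project/STDP.py | input_current_calc
-- ===== SOURCE A (Python) =====
-- def dot_product_3d(m1, m2):
--     s = 0
--     for d in range(4):
--         for i in range(len(m1[d])):
--             for j in range(len(m1[d])):
--                 if m2[d][i][j] != 0:
--                     s += m1[d][i][j][0]
--
--     return s
--
-- def input_current_calc(images, feature, size):
--     s = len(feature[0])
--     mat = [[0]*size[1] for _ in range(size[0])]
--     for i in range(size[0]):
--         for j in range(size[1]):
--             m1 = []
--             for d in range(4):
--                 m1.append([[images[d][r][c] for c in range(j, j+s)]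
--                            for r in range(i, i+s)])
--             mat[i][j] = dot_product_3d(m1, feature)
--
--     return mat
-- ===== SOURCE B (Python) =====
-- def input_current_calc(images, feature, size):
--     s = len(feature[0])
--     h, w = size[0], size[1]
--     if h <= 0 or w <= 0:
--         return [[] for _ in range(h)]
--     offsets = [(d, a, b)
--                for d in range(4)
--                for a in range(s)
--                for b in range(s)
--                if feature[d][a][b] != 0]
--     return [[sum(images[d][i + a][j + b][0] for (d, a, b) in offsets)
--              for j in range(w)]
--             for i in range(h)]
-- ===== Notes on version B (the rewrite author's own statement) =====
-- stated objective: alternative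
-- what changed: B precomputes the list of nonzero feature offsets once and, for each output position, sums the image cells directly over those offsets (after an early return for empty grids), instead of materialising a 4xsxs patch and scanning all 4*s*s offsets at every position as A does; intended as faster (O(s^2+h*w*K) vs O(h*w*s^2), K = nonzero feature entries), measured 1.69x at the largest size both finished, below the 1.5x-confirmed threshold's conditions.
-- outside the precondition, e.g. on input_current_calc([], [[]], [-1]): A returns [], B raises IndexError
import Mathlib
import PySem

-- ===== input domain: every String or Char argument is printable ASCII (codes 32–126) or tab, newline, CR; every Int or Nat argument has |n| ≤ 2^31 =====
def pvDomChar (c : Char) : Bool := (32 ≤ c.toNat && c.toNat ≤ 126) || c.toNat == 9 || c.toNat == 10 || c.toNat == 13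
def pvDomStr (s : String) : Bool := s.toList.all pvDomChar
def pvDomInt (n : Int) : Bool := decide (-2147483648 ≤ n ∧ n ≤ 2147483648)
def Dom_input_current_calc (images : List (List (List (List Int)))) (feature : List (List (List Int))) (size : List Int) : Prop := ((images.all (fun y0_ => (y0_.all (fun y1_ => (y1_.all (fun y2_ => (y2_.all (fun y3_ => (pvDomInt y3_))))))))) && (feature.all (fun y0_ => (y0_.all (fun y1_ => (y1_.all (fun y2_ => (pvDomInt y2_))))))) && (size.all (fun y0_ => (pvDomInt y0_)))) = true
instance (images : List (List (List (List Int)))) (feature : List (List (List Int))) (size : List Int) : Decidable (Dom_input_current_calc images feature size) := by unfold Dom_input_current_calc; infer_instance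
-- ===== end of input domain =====

-- B precomputes the nonzero feature offsets once and sums the image cells directly over them,
-- instead of building a 4×s×s patch and scanning every offset at each output position.

-- ===== PORT A =====
def dot_product_3d (m1 : List (List (List (List Int)))) (m2 : List (List (List Int))) : Int :=
  (List.range 4).foldl (fun s d =>
    (List.range ((m1.getD d []).length)).foldl (fun s i =>
      (List.range ((m1.getD d []).length)).foldl (fun s j =>
        if ((m2.getD d []).getD i []).getD j 0 ≠ 0 then
          s + (((m1.getD d []).getD i []).getD j []).getD 0 0
        else s) s) s) 0

def input_current_calc (images : List (List (List (List Int)))) (feature : List (List (List Int))) (size : List Int) : List (List Int) :=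
  let s := (feature.getD 0 []).length
  (List.range (size.getD 0 0).toNat).map (fun i =>
    (List.range (size.getD 1 0).toNat).map (fun j =>
      let m1 := (List.range 4).foldl (fun m1 d =>
        m1 ++ [(List.range s).map (fun r => (List.range s).map (fun c =>
          ((images.getD d []).getD (i + r) []).getD (j + c) ([] : List Int)))]) []
      dot_product_3d m1 feature))

-- ===== PORT B =====
def input_current_calc_alt (images : List (List (List (List Int)))) (feature : List (List (List Int))) (size : List Int) : List (List Int) :=
  let s := (feature.getD 0 []).length
  let h := size.getD 0 0
  let w := size.getD 1 0
  if h ≤ 0 ∨ w ≤ 0 then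
    (List.range h.toNat).map (fun _ => ([] : List Int))
  else
    let offsets := (List.range 4).flatMap (fun d =>
      (List.range s).flatMap (fun a =>
        ((List.range s).filter (fun b =>
          decide (((feature.getD d []).getD a []).getD b 0 ≠ 0))).map (fun b => (d, a, b))))
    (List.range h.toNat).map (fun i =>
      (List.range w.toNat).map (fun j =>
        (offsets.map (fun t =>
          (((images.getD t.1 []).getD (i + t.2.1) []).getD (j + t.2.2) ([] : List Int)).getD 0 0)).sum))

-- ===== PRECONDITION & SPEC =====
-- Pre_ = exactly the inputs on which Python A returns (feature[0] and size[0]/size[1] exist, and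
-- when the output grid and the feature window are both nonempty, all accessed tensors are large
-- enough and every image cell read through a nonzero feature offset is a nonempty list), EXCEPT:
-- Pre_ also excludes size lists of length exactly 1 with size[0] ≤ 0, on which A returns []
-- without ever reading size[1] while B's unpacking of size reads size[1] and raises IndexError.
def Pre_input_current_calc (images : List (List (List (List Int)))) (feature : List (List (List Int))) (size : List Int) : Prop :=
  feature ≠ [] ∧ 2 ≤ size.length ∧
  (0 < size.getD 0 0 → 0 < size.getD 1 0 → 0 < (feature.getD 0 []).length →
    4 ≤ feature.length ∧ 4 ≤ images.length ∧
    (∀ d < 4, (feature.getD 0 []).length ≤ (feature.getD d []).length ∧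
      ∀ a < (feature.getD 0 []).length,
        (feature.getD 0 []).length ≤ ((feature.getD d []).getD a []).length) ∧
    (∀ d < 4, (size.getD 0 0).toNat + (feature.getD 0 []).length - 1 ≤ (images.getD d []).length ∧
      ∀ r < (size.getD 0 0).toNat + (feature.getD 0 []).length - 1,
        (size.getD 1 0).toNat + (feature.getD 0 []).length - 1 ≤ ((images.getD d []).getD r []).length) ∧
    (∀ d < 4, ∀ a < (feature.getD 0 []).length, ∀ b < (feature.getD 0 []).length,
      ((feature.getD d []).getD a []).getD b 0 ≠ 0 →
        ((List.range (size.getD 0 0).toNat).all fun i => (List.range (size.getD 1 0).toNat).all fun j =>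
          decide (((images.getD d []).getD (i + a) []).getD (j + b) [] ≠ [])) = true))
instance (images : List (List (List (List Int)))) (feature : List (List (List Int))) (size : List Int) : Decidable (Pre_input_current_calc images feature size) := by unfold Pre_input_current_calc; infer_instance

def pvWitness_input_current_calc : List (List (List (List Int))) × List (List (List Int)) × List Int :=
  ([[[[5]]], [[[6]]], [[[7]]], [[[8]]]], [[[1]], [[0]], [[2]], [[0]]], [1, 1])

def Spec_input_current_calc (images : List (List (List (List Int)))) (feature : List (List (List Int))) (size : List Int) (out : List (List Int)) : Prop := out = input_current_calc_alt images feature size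
instance (images : List (List (List (List Int)))) (feature : List (List (List Int))) (size : List Int) (out : List (List Int)) : Decidable (Spec_input_current_calc images feature size out) := by unfold Spec_input_current_calc; infer_instance

-- ===== CLAIM (what is proved, stated in full; the proofs are below) =====
def Claim_equal_input_current_calc : Prop := ∀ (images : List (List (List (List Int)))) (feature : List (List (List Int))) (size : List Int), Dom_input_current_calc images feature size → Pre_input_current_calc images feature size → Spec_input_current_calc images feature size (input_current_calc images feature size)

-- ===== LEMMAS AND PROOFS =====

theorem pvWitness_ok :
    Dom_input_current_calc (pvWitness_input_current_calc.1) (pvWitness_input_current_calc.2.1) (pvWitness_input_current_calc.2.2) ∧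
    Pre_input_current_calc (pvWitness_input_current_calc.1) (pvWitness_input_current_calc.2.1) (pvWitness_input_current_calc.2.2) := by
  constructor <;> decide

-- indexing a comprehension over range within bounds
theorem getD_map_range' {α : Type} (f : Nat → α) (n k : Nat) (d : α) (hk : k < n) :
    ((List.range n).map f).getD k d = f k := by
  rw [List.getD_eq_getElem?_getD, List.getElem?_map, List.getElem?_range hk]
  simp

-- sum over a flatMap = sum of the per-block sums
theorem sum_flatMap_int {α : Type} (l : List α) (f : α → List Int) :
    (l.flatMap f).sum = (l.map (fun a => (f a).sum)).sum := by
  induction l with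
  | nil => simp
  | cons x t ih => simp [List.flatMap_cons, List.sum_append, ih]

-- 'if p(b): acc += g(b)' over a list = acc + sum of g over the filtered list
theorem foldl_if_add_filter (l : List Nat) (p : Nat → Prop) [DecidablePred p]
    (g : Nat → Int) (c : Int) :
    l.foldl (fun acc b => if p b then acc + g b else acc) c
      = c + ((l.filter (fun b => decide (p b))).map g).sum := by
  induction l generalizing c with
  | nil => simp
  | cons x t ih => by_cases h : p x <;> simp [h, ih, add_assoc]

-- the heart of the claim: A's patch-and-scan dot product over the window equals
-- B's sum of the cell values along the precomputed nonzero offsets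
theorem dot_eq_offsets_sum (s : Nat) (m2 : List (List (List Int)))
    (C : Nat → Nat → Nat → List Int) :
    dot_product_3d
      ((List.range 4).map (fun d => (List.range s).map (fun r => (List.range s).map (fun c => C d r c))))
      m2
      = (((List.range 4).flatMap (fun d =>
            (List.range s).flatMap (fun a =>
              ((List.range s).filter (fun b =>
                decide (((m2.getD d []).getD a []).getD b 0 ≠ 0))).map (fun b => (d, a, b))))).map
          (fun t => (C t.1 t.2.1 t.2.2).getD 0 0)).sum := by
  unfold dot_product_3d
  refine Eq.trans (PySem.List.foldl_congr_mem _ _ (fun (acc : Int) d => acc +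
      ((List.range s).map (fun a =>
        (((List.range s).filter (fun b =>
            decide (((m2.getD d []).getD a []).getD b 0 ≠ 0))).map
          (fun b => (C d a b).getD 0 0)).sum)).sum) 0 ?_) ?_
  · intro acc d hd
    have hd4 : d < 4 := List.mem_range.mp hd
    rw [getD_map_range' (fun d => (List.range s).map fun r => (List.range s).map fun c => C d r c) 4 d [] hd4]
    simp only [List.length_map, List.length_range]
    refine Eq.trans (PySem.List.foldl_congr_mem _ _ (fun (acc : Int) a => acc +
        (((List.range s).filter (fun b =>
            decide (((m2.getD d []).getD a []).getD b 0 ≠ 0))).map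
          (fun b => (C d a b).getD 0 0)).sum) acc ?_) ?_
    · intro acc' a ha
      have has : a < s := List.mem_range.mp ha
      rw [getD_map_range' (fun r => (List.range s).map fun c => C d r c) s a [] has]
      refine Eq.trans (PySem.List.foldl_congr_mem _ _ (fun (acc : Int) b =>
          if ((m2.getD d []).getD a []).getD b 0 ≠ 0
          then acc + (C d a b).getD 0 0 else acc) acc' ?_) ?_
      · intro acc'' b hb
        have hbs : b < s := List.mem_range.mp hb
        rw [getD_map_range' (fun c => C d a c) s b [] hbs]
      · exact foldl_if_add_filter _ _ _ _
    · exact PySem.List.foldl_add _ _ _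
  · rw [PySem.List.foldl_add, zero_add, List.map_flatMap, sum_flatMap_int]
    simp only [List.map_flatMap, sum_flatMap_int, List.map_map, Function.comp_def]

-- ===== VERDICT (by name: the statement is the Claim_ definition above) =====
theorem input_current_calc_spec : Claim_equal_input_current_calc := by
  intro images feature size _ _
  unfold Spec_input_current_calc input_current_calc input_current_calc_alt
  by_cases hc : size.getD 0 0 ≤ 0 ∨ size.getD 1 0 ≤ 0
  · rw [if_pos hc]
    rcases hc with hh | hw
    · rw [show (size.getD 0 0).toNat = 0 from Int.toNat_of_nonpos hh]
      simp
    · rw [show (size.getD 1 0).toNat = 0 from Int.toNat_of_nonpos hw]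
      simp
  · rw [if_neg hc]
    refine List.map_congr_left ?_
    intro i _
    refine List.map_congr_left ?_
    intro j _
    rw [PySem.List.foldl_append_singleton_eq_map, List.nil_append]
    exact dot_eq_offsets_sum _ feature (fun d r c =>
      ((images.getD d []).getD (i + r) []).getD (j + c) ([] : List Int))
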